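-- pv_equiv track=rewrite | github.com/itsZiang/legal-rag | backend/src/data-processing/merge_json.py | process_file_data
-- ===== SOURCE A (Python) =====
-- def process_file_data(file1_data, folder2_data):
--     result = []
--
--     # Create a dictionary to store all items from folder2 by title
--     folder2_by_title = {}
--     for item in folder2_data:
--         title = item['title']
--         if title not in folder2_by_title:
--             folder2_by_title[title] = []
--         folder2_by_title[title].append(item)
--
--     # Process items from file1
--     for item in file1_data:
--         title = item['title']
--
--         # If title exists in folder2, add all items from folder2 with this title
--         if title in folder2_by_title:
--             result.extend(folder2_by_title[title])
--             # We don't delete from folder2_by_title here because we process each file independently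
--         else:
--             # If title doesn't exist in folder2, keep the original item
--             result.append(item)
--
--     return result
-- ===== SOURCE B (Python) =====
-- def process_file_data(file1_data, folder2_data):
--     # Transposed traversal: iterate folder2_data outermost, distributing each
--     # entry into a bucket per file1 item with a matching title; then assemble.
--     buckets = [[] for _ in file1_data]
--     for y in folder2_data:
--         for i, item in enumerate(file1_data):
--             if item['title'] == y['title']:
--                 buckets[i].append(y)
--     out = []
--     for item, bucket in zip(file1_data, buckets):
--         out.extend(bucket if bucket else [item])
--     return out
-- ===== Notes on version B (the rewrite author's own statement) =====
-- stated objective: alternative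
-- what changed: Replaces A's title-keyed dictionary and file1-major lookup loop with a transposed traversal: the outer loop runs over folder2_data, distributing each entry into per-file1-item buckets (inner scan over file1_data), and a final assembly pass concatenates each bucket or falls back to the original item.
import Mathlib
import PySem

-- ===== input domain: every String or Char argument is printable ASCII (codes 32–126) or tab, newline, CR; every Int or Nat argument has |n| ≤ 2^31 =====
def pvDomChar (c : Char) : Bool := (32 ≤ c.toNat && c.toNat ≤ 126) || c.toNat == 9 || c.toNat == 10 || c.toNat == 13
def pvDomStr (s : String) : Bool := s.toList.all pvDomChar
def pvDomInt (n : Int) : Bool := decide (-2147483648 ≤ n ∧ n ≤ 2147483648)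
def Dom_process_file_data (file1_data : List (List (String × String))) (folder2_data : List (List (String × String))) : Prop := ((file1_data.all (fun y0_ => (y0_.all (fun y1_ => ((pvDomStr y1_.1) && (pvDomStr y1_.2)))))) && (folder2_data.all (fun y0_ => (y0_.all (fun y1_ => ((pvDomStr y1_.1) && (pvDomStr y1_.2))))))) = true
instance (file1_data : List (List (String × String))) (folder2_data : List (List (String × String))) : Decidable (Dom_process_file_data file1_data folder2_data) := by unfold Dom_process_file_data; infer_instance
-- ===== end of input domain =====

-- B replaces A's title-keyed dictionary with a transposed traversal: outer loop over folder2_data filling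
-- per-file1-item buckets, then an assembly pass (an alternative of similar cost, not claimed faster).
-- ===== PORT A =====
-- item['title'] (an assoc-list dict); Pre_ guarantees the key is present, so the default is never used
def pvTitle (item : List (String × String)) : String :=
  (PySem.Dict.mk item).getD "title" ""

def process_file_data (file1_data : List (List (String × String))) (folder2_data : List (List (String × String))) : List (List (String × String)) :=
  let folder2_by_title : PySem.Dict String (List (List (String × String))) :=
    folder2_data.foldl (fun d item =>
      let title := pvTitle item
      let d := if d.contains title then d else d.insert title []
      d.insert title (d.getD title [] ++ [item])) PySem.Dict.empty
  file1_data.foldl (fun result item =>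
    let title := pvTitle item
    if folder2_by_title.contains title then
      result ++ folder2_by_title.getD title []
    else
      result ++ [item]) []

-- ===== PORT B =====
def process_file_data_alt (file1_data : List (List (String × String))) (folder2_data : List (List (String × String))) : List (List (String × String)) :=
  -- buckets: one list per file1 item; each folder2 entry is appended to every bucket whose item's title matches
  let buckets : List (List (List (String × String))) :=
    folder2_data.foldl (fun bs y =>
      (file1_data.zip bs).map (fun p => if pvTitle p.1 == pvTitle y then p.2 ++ [y] else p.2))
      (file1_data.map (fun _ => []))
  -- assembly pass: each bucket, or the original item when its bucket is empty
  (file1_data.zip buckets).foldl (fun out p => out ++ (if !p.2.isEmpty then p.2 else [p.1])) []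

-- ===== PRECONDITION & SPEC =====
-- Pre_ excludes exactly the inputs where Python A raises KeyError: an item (in either list) without a 'title' key.
def Pre_process_file_data (file1_data : List (List (String × String))) (folder2_data : List (List (String × String))) : Prop :=
  (file1_data.all (fun item => (PySem.Dict.mk item).contains "title") &&
   folder2_data.all (fun item => (PySem.Dict.mk item).contains "title")) = true

instance (file1_data : List (List (String × String))) (folder2_data : List (List (String × String))) : Decidable (Pre_process_file_data file1_data folder2_data) := by unfold Pre_process_file_data; infer_instance

def pvWitness_process_file_data : (List (List (String × String))) × (List (List (String × String))) :=
  ([[("title", "a")], [("title", "b")]], [[("title", "a"), ("x", "1")], [("title", "a"), ("x", "2")]])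

def Spec_process_file_data (file1_data : List (List (String × String))) (folder2_data : List (List (String × String))) (out : List (List (String × String))) : Prop := out = process_file_data_alt file1_data folder2_data
instance (file1_data : List (List (String × String))) (folder2_data : List (List (String × String))) (out : List (List (String × String))) : Decidable (Spec_process_file_data file1_data folder2_data out) := by unfold Spec_process_file_data; infer_instance

-- ===== CLAIM (what is proved, stated in full; the proofs are below) =====
def Claim_equal_process_file_data : Prop := ∀ (file1_data : List (List (String × String))) (folder2_data : List (List (String × String))), Dom_process_file_data file1_data folder2_data → Pre_process_file_data file1_data folder2_data → Spec_process_file_data file1_data folder2_data (process_file_data file1_data folder2_data)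

-- ===== LEMMAS AND PROOFS =====
-- The grouping dict's lookup at t is exactly the filter of the remaining items by title t (appended to the prior value).
lemma buildDict_getD (l : List (List (String × String))) (d : PySem.Dict String (List (List (String × String)))) (t : String) :
    (l.foldl (fun d item =>
      let title := pvTitle item
      let d := if d.contains title then d else d.insert title []
      d.insert title (d.getD title [] ++ [item])) d).getD t []
    = d.getD t [] ++ l.filter (fun x => pvTitle x == t) := by
  induction l generalizing d with
  | nil => simp
  | cons x xs ih =>
    simp only [List.foldl_cons, ih, List.filter_cons]
    by_cases ht : pvTitle x = t
    · subst ht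
      by_cases hc : ((d.contains (pvTitle x)) : Bool)
      · simp [hc, PySem.Dict.getD_insert_self]
      · simp at hc
        simp [hc, PySem.Dict.getD_insert_self, PySem.Dict.getD_of_not_contains _ _ hc]
    · have hne : t ≠ pvTitle x := Ne.symm ht
      by_cases hc : ((d.contains (pvTitle x)) : Bool)
      · simp [hc, PySem.Dict.getD_insert_of_ne _ _ _ hne, ht]
      · simp at hc
        simp [hc, PySem.Dict.getD_insert_of_ne _ _ _ hne, ht]

lemma buildDict_contains (l : List (List (String × String))) (d : PySem.Dict String (List (List (String × String)))) (t : String) :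
    (l.foldl (fun d item =>
      let title := pvTitle item
      let d := if d.contains title then d else d.insert title []
      d.insert title (d.getD title [] ++ [item])) d).contains t
    = (d.contains t || !(l.filter (fun x => pvTitle x == t)).isEmpty) := by
  induction l generalizing d with
  | nil => simp
  | cons x xs ih =>
    simp only [List.foldl_cons, ih, List.filter_cons]
    by_cases ht : pvTitle x = t
    · subst ht
      by_cases hc : ((d.contains (pvTitle x)) : Bool)
      · simp [hc]
      · simp at hc
        simp [hc]
    · have hne : (t == pvTitle x) = false := by simp [Ne.symm ht]
      by_cases hc : ((d.contains (pvTitle x)) : Bool)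
      · simp [hc, PySem.Dict.contains_insert, hne, ht]
      · simp at hc
        simp [hc, PySem.Dict.contains_insert, hne, ht]

lemma zip_map_self {α β : Type} (l : List α) (g : α → β) :
    l.zip (l.map g) = l.map (fun a => (a, g a)) := by
  induction l with
  | nil => rfl
  | cons x xs ih => simp [ih]

-- The bucket fold computes, per file1 item, the folder2 entries with matching title (after the prior bucket value).
lemma buckets_eq (f2 f1 : List (List (String × String))) (g : List (String × String) → List (List (String × String))) :
    f2.foldl (fun bs y =>
      (f1.zip bs).map (fun p => if pvTitle p.1 == pvTitle y then p.2 ++ [y] else p.2)) (f1.map g)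
    = f1.map (fun item => g item ++ f2.filter (fun x => pvTitle x == pvTitle item)) := by
  induction f2 generalizing g with
  | nil => simp
  | cons y ys ih =>
    simp only [List.foldl_cons]
    rw [zip_map_self, List.map_map]
    rw [show ((fun p : (List (String × String)) × (List (List (String × String))) =>
          if pvTitle p.1 == pvTitle y then p.2 ++ [y] else p.2) ∘ (fun a => (a, g a)))
        = fun item => if pvTitle item == pvTitle y then g item ++ [y] else g item from rfl]
    rw [ih]
    apply List.map_congr_left
    intro item _
    simp only [List.filter_cons]
    by_cases h : pvTitle item = pvTitle y
    · have h' : (pvTitle y == pvTitle item) = true := by simp [h.symm]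
      simp [h, h']
    · have h' : (pvTitle y == pvTitle item) = false := by
        simp only [beq_eq_false_iff_ne, ne_eq]
        exact fun e => h e.symm
      simp [h, h']

-- ===== VERDICT (by name: the statement is the Claim_ definition above) =====
theorem process_file_data_spec : Claim_equal_process_file_data := by
  intro f1 f2 _ _
  unfold Spec_process_file_data process_file_data process_file_data_alt
  simp only []
  rw [buckets_eq, zip_map_self, List.foldl_map]
  congr 1
  funext result item
  rw [buildDict_contains, buildDict_getD]
  simp only [PySem.Dict.getD_empty, PySem.Dict.contains_empty, Bool.false_or, List.nil_append]
  split <;> simp_all
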